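-- pv_equiv track=rewrite | github.com/tarun-nko/word-helper | word_helper.py | check_contains
-- ===== SOURCE A (Python) =====
-- def check_contains(contains_list, word, a, b):
--     if b != 0:
--         word = word[a:-1 * b]
--     else: word = word[a:]
--     from collections import defaultdict
--     d = defaultdict(lambda: 0)
--     for c in contains_list:
--         d[c] = d[c] + 1
--     for w in word:
--         if w in d and d[w] != 0:
--             d[w] -= 1
--         else:
--             return False
--     return True
-- ===== SOURCE B (Python) =====
-- def check_contains(contains_list, word, a, b):
--     if b != 0:
--         word = word[a:-1 * b]
--     else:
--         word = word[a:]
--     need = sorted(word)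
--     have = sorted(contains_list)
--     i = 0
--     for s in have:
--         if i < len(need) and need[i] == s:
--             i += 1
--     return i == len(need)
-- ===== Notes on version B (the rewrite author's own statement) =====
-- stated objective: alternative
-- what changed: Replaces A's decrementing-defaultdict consume loop by sorting the sliced word's characters and contains_list and running a greedy two-pointer sub-multiset (sorted subsequence) scan, with no counting table at all.
import Mathlib
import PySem

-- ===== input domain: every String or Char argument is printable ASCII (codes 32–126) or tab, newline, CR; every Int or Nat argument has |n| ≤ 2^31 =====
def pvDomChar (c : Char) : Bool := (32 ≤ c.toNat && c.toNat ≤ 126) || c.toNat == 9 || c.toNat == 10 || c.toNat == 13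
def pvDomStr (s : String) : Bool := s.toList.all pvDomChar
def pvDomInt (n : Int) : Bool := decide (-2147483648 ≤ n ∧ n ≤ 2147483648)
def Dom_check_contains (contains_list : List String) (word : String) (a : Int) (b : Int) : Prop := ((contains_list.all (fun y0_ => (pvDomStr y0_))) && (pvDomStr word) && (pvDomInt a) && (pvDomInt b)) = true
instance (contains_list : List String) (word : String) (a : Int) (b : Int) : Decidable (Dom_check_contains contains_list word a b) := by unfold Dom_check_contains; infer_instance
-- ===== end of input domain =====

-- B replaces A's decrementing-defaultdict consume loop by sorting the sliced word's characters
-- and contains_list and running a greedy two-pointer sorted-subsequence scan (no counting table).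

-- ===== PORT A =====
-- the 'for w in word' consume loop: decrement, early return False
def pvLoopA : PySem.Dict String Int → List Char → Bool
  | _, [] => true
  | d, w :: ws =>
    let k := String.ofList [w]
    if d.contains k && (d.getD k 0 != 0) then pvLoopA (d.insert k (d.getD k 0 - 1)) ws
    else false

def check_contains (contains_list : List String) (word : String) (a : Int) (b : Int) : Bool :=
  let cs := if b ≠ 0 then PySem.List.slice word.toList (some a) (some (-1 * b))
            else PySem.List.slice word.toList (some a) none
  let d := contains_list.foldl (fun d c => d.insert c (d.getD c 0 + 1)) PySem.Dict.empty
  pvLoopA d cs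

-- ===== PORT B =====
def check_contains_alt (contains_list : List String) (word : String) (a : Int) (b : Int) : Bool :=
  let cs := if b ≠ 0 then PySem.List.slice word.toList (some a) (some (-1 * b))
            else PySem.List.slice word.toList (some a) none
  let need := PySem.List.sorted (cs.map (fun c => String.ofList [c])) (fun x => x) false
  let haveL := PySem.List.sorted contains_list (fun x => x) false
  let i := haveL.foldl
    (fun (i : Int) s => if i < PySem.List.len need && PySem.List.pyGetD need i "" == s then i + 1 else i) 0
  i == PySem.List.len need

-- ===== PRECONDITION & SPEC =====
def Spec_check_contains (contains_list : List String) (word : String) (a : Int) (b : Int) (out : Bool) : Prop := out = check_contains_alt contains_list word a b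
instance (contains_list : List String) (word : String) (a : Int) (b : Int) (out : Bool) : Decidable (Spec_check_contains contains_list word a b out) := by unfold Spec_check_contains; infer_instance

-- ===== CLAIM (what is proved, stated in full; the proofs are below) =====
def Claim_equal_check_contains : Prop := ∀ (contains_list : List String) (word : String) (a : Int) (b : Int), Dom_check_contains contains_list word a b → Spec_check_contains contains_list word a b (check_contains contains_list word a b)

-- ===== LEMMAS AND PROOFS =====

lemma pvSingleton_inj : Function.Injective (fun c : Char => String.ofList [c]) := by
  intro c d h
  have := congrArg String.toList h
  simpa using this

-- A's loop succeeds iff every character's count in the remaining word fits in the dict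
lemma pvLoopA_iff (cs : List Char) (d : PySem.Dict String Int)
    (hnn : ∀ s : String, 0 ≤ d.getD s 0) :
    pvLoopA d cs = true ↔ ∀ c : Char, (cs.count c : Int) ≤ d.getD (String.ofList [c]) 0 := by
  induction cs generalizing d with
  | nil =>
    constructor
    · intro _ c
      simpa using hnn _
    · intro _
      rfl
  | cons w ws ih =>
    simp only [pvLoopA]
    by_cases hc : d.contains (String.ofList [w]) = true
    · by_cases hv : d.getD (String.ofList [w]) 0 = 0
      · simp only [hc, hv]
        simp only [bne_self_eq_false, Bool.and_false]
        constructor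
        · intro h; exact absurd h (by simp)
        · intro h
          exfalso
          have := h w
          rw [hv] at this
          simp [List.count_cons_self] at this
          omega
      · have hpos : 0 < d.getD (String.ofList [w]) 0 := lt_of_le_of_ne (hnn _) (Ne.symm hv)
        simp only [hc, Bool.true_and, bne_iff_ne, ne_eq, hv, not_false_iff, if_true]
        have hnn' : ∀ s : String, 0 ≤ (d.insert (String.ofList [w]) (d.getD (String.ofList [w]) 0 - 1)).getD s 0 := by
          intro s
          rw [PySem.Dict.getD_insert]
          split_ifs with h
          · omega
          · exact hnn s
        rw [ih _ hnn']
        apply forall_congr'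
        intro c
        rw [PySem.Dict.getD_insert]
        by_cases hcw : c = w
        · subst hcw
          simp only [List.count_cons_self]
          push_cast
          omega
        · have hne : String.ofList [c] ≠ String.ofList [w] := fun h => hcw (pvSingleton_inj h)
          rw [if_neg hne, List.count_cons_of_ne (Ne.symm hcw)]
    · have hz : d.getD (String.ofList [w]) 0 = 0 :=
        PySem.Dict.getD_of_not_contains d 0 (by simpa using hc)
      simp only [hc, Bool.false_and]
      constructor
      · intro h; exact absurd h (by simp)
      · intro h
        exfalso
        have := h w
        rw [hz] at this
        simp [List.count_cons_self] at this
        omega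

-- the two quantifications (over chars / over singleton strings) agree
lemma pvBridge (cs : List Char) (cl : List String) :
    (∀ c : Char, (cs.count c : Int) ≤ (cl.count (String.ofList [c]) : Int)) ↔
    (∀ s : String, ((cs.map (fun c => String.ofList [c])).count s : Int) ≤ (cl.count s : Int)) := by
  constructor
  · intro h s
    by_cases hs : s ∈ cs.map (fun c => String.ofList [c])
    · obtain ⟨c, hc, rfl⟩ := List.mem_map.mp hs
      rw [List.count_map_of_injective _ _ pvSingleton_inj]
      exact h c
    · rw [List.count_eq_zero.mpr hs]
      exact_mod_cast Int.natCast_nonneg _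
  · intro h c
    have := h (String.ofList [c])
    rwa [List.count_map_of_injective _ _ pvSingleton_inj] at this

-- the greedy match count of B's two-pointer scan (how many elements of 'need' get consumed)
def pvMatched : List String → List String → Nat
  | _, [] => 0
  | [], _ :: _ => 0
  | n :: ns, h :: hs => if n = h then pvMatched ns hs + 1 else pvMatched (n :: ns) hs

lemma pvMatched_nil (hs : List String) : pvMatched [] hs = 0 := by
  cases hs <;> rfl

-- B's fold computes the greedy match count past position i0
lemma pvFold_eq_matched (haveL need : List String) (i0 : Nat) (h : i0 ≤ need.length) :
    haveL.foldl
      (fun (i : Int) s => if i < PySem.List.len need && PySem.List.pyGetD need i "" == s then i + 1 else i)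
      (i0 : Int) = (i0 + pvMatched (need.drop i0) haveL : Nat) := by
  induction haveL generalizing i0 with
  | nil => simp
  | cons s hs ih =>
    simp only [List.foldl_cons]
    by_cases hlt : i0 < need.length
    · have hdrop : need.drop i0 = need[i0] :: need.drop (i0 + 1) :=
        (List.getElem_cons_drop hlt).symm
      by_cases heq : need[i0] = s
      · have hcond : ((i0 : Int) < PySem.List.len need && PySem.List.pyGetD need (i0 : Int) "" == s) = true := by
          simp [PySem.List.len_eq, PySem.List.pyGetD_natCast, List.getD_eq_getElem?_getD, heq, hlt]
        rw [hcond]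
        simp only [if_true]
        have : ((i0 : Int) + 1) = ((i0 + 1 : Nat) : Int) := by push_cast; ring
        rw [this, ih (i0 + 1) (by omega), hdrop]
        simp [pvMatched, heq]
        omega
      · have hcond : ((i0 : Int) < PySem.List.len need && PySem.List.pyGetD need (i0 : Int) "" == s) = false := by
          simp [PySem.List.len_eq, PySem.List.pyGetD_natCast, List.getD_eq_getElem?_getD, hlt]
          intro h'; exact heq h'
        rw [hcond]
        simp only [if_false, Bool.false_eq_true]
        rw [ih i0 h, hdrop]
        simp [pvMatched, heq]
    · have hi0 : i0 = need.length := by omega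
      have hcond : ((i0 : Int) < PySem.List.len need && PySem.List.pyGetD need (i0 : Int) "" == s) = false := by
        simp [PySem.List.len_eq]
        omega
      rw [hcond]
      simp only [if_false, Bool.false_eq_true]
      rw [ih i0 h]
      subst hi0
      simp [pvMatched_nil]

-- greedy consumes all of 'need' iff 'need' is a subsequence of 'haveL'
lemma pvMatched_full_iff_sublist (haveL need : List String) :
    pvMatched need haveL = need.length ↔ List.Sublist need haveL := by
  induction haveL generalizing need with
  | nil =>
    cases need with
    | nil => simp [pvMatched]
    | cons n ns => simp [pvMatched]
  | cons h hs ih =>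
    cases need with
    | nil => simp [pvMatched_nil]
    | cons n ns =>
      simp only [pvMatched]
      by_cases heq : n = h
      · subst heq
        simp only [if_true, List.length_cons]
        constructor
        · intro he
          exact List.Sublist.cons₂ n ((ih ns).mp (by omega))
        · intro hsub
          have hns : List.Sublist ns hs := (List.cons_sublist_cons).mp hsub
          have := (ih ns).mpr hns
          omega
      · rw [if_neg heq, ih (n :: ns)]
        constructor
        · intro hsub
          exact hsub.cons h
        · intro hsub
          cases hsub with
          | cons _ htl => exact htl
          | cons₂ _ _ => exact absurd rfl heq

-- count-wise domination iff the sorted lists are in the subsequence relation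
lemma pvSorted_sublist_iff (X cl : List String) :
    (List.Sublist (PySem.List.sorted X (fun x => x) false) (PySem.List.sorted cl (fun x => x) false)) ↔
    (∀ s : String, (X.count s : Int) ≤ (cl.count s : Int)) := by
  have hpX : (PySem.List.sorted X (fun x => x) false).Perm X := PySem.List.sorted_perm X _ _
  have hpC : (PySem.List.sorted cl (fun x => x) false).Perm cl := PySem.List.sorted_perm cl _ _
  constructor
  · intro hsub s
    have hsp : List.Subperm X cl := (hpC.subperm_left.mp (hpX.subperm_right.mp hsub.subperm))
    by_cases hm : s ∈ X
    · exact_mod_cast List.subperm_ext_iff.mp hsp s hm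
    · rw [List.count_eq_zero.mpr hm]
      exact_mod_cast Int.natCast_nonneg _
  · intro hcnt
    have hsp : List.Subperm X cl := List.subperm_ext_iff.mpr (fun s _ => by exact_mod_cast hcnt s)
    have hsp' : List.Subperm (PySem.List.sorted X (fun x => x) false) (PySem.List.sorted cl (fun x => x) false) :=
      hpC.subperm_left.mpr (hpX.subperm_right.mpr hsp)
    exact List.sublist_of_subperm_of_pairwise hsp'
      (PySem.List.sorted_pairwise X _) (PySem.List.sorted_pairwise cl _)

-- ===== VERDICT (by name: the statement is the Claim_ definition above) =====
theorem check_contains_spec : Claim_equal_check_contains := by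
  intro cl w a b _
  unfold Spec_check_contains check_contains check_contains_alt
  set cs := if b ≠ 0 then PySem.List.slice w.toList (some a) (some (-1 * b))
            else PySem.List.slice w.toList (some a) none with hcs
  simp only
  rw [Bool.eq_iff_iff]
  have hd : ∀ s : String,
      (cl.foldl (fun d c => d.insert c (d.getD c 0 + 1)) PySem.Dict.empty).getD s 0 = (cl.count s : Int) := by
    intro s
    have := PySem.Dict.getD_foldl_insert_add_one cl PySem.Dict.empty s
    simpa [PySem.Dict.getD_empty] using this
  have hnn : ∀ s : String,
      (0 : Int) ≤ (cl.foldl (fun d c => d.insert c (d.getD c 0 + 1)) PySem.Dict.empty).getD s 0 := by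
    intro s
    rw [hd s]
    exact_mod_cast Int.natCast_nonneg _
  set need := PySem.List.sorted (cs.map (fun c => String.ofList [c])) (fun x => x) false with hneed
  set haveL := PySem.List.sorted cl (fun x => x) false with hhave
  have hfold := pvFold_eq_matched haveL need 0 (Nat.zero_le _)
  rw [pvLoopA_iff cs _ hnn]
  have hA : (∀ c : Char, (cs.count c : Int) ≤
      (cl.foldl (fun d c => d.insert c (d.getD c 0 + 1)) PySem.Dict.empty).getD (String.ofList [c]) 0) ↔
      (∀ c : Char, (cs.count c : Int) ≤ (cl.count (String.ofList [c]) : Int)) := by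
    apply forall_congr'; intro c; rw [hd]
  rw [hA, pvBridge, ← pvSorted_sublist_iff, ← pvMatched_full_iff_sublist]
  have hfold' : (haveL.foldl
      (fun (i : Int) s => if i < PySem.List.len need && PySem.List.pyGetD need i "" == s then i + 1 else i) 0)
      = (pvMatched need haveL : Int) := by
    have := pvFold_eq_matched haveL need 0 (Nat.zero_le _)
    simpa using this
  rw [hfold']
  simp only [PySem.List.len_eq, beq_iff_eq, Nat.cast_inj]
  rw [← hneed, ← hhave]
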